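-- pv_equiv track=rewrite | github.com/2739818787/hushh_test | dataflow_delay_calc.py | get_signal_delay_by_start_signal_list
-- ===== SOURCE A (Python) =====
-- def get_signal_delay_by_start_signal_list(signal_list, signal_delay):
--     part_signal_delay = {}
--     avoid_loop = []
--     while(len(signal_list)):
--         input = signal_list.pop()
--         avoid_loop.append(input)
--         for key,value in signal_delay.items():
--             if input == key[0]:
--                 part_signal_delay[key] = value
--                 output = key[1]
--                 if output not in signal_list and output not in avoid_loop:
--                     signal_list.append(output)
--
--     return part_signal_delay
-- ===== SOURCE B (Python) =====
-- def get_signal_delay_by_start_signal_list(signal_list, signal_delay):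
--     # No start signals: nothing is reachable.
--     if not signal_list:
--         return {}
--     # Index edges by source once, then do a stack DFS with an O(1) 'seen' set
--     # (seen = on-stack or already-visited, which is exactly A's push condition).
--     adjacency = {}
--     for key, value in signal_delay.items():
--         adjacency.setdefault(key[0], []).append((key, value))
--     part_signal_delay = {}
--     stack = list(signal_list)
--     seen = set(signal_list)
--     while stack:
--         u = stack.pop()
--         for key, value in adjacency.get(u, ()):
--             part_signal_delay[key] = value
--             w = key[1]
--             if w not in seen:
--                 seen.add(w)
--                 stack.append(w)
--     return part_signal_delay
-- ===== Notes on version B (the rewrite author's own statement) =====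
-- stated objective: faster
-- what changed: B indexes signal_delay by source signal once into an adjacency dict and runs a stack DFS with an O(1) 'seen' set (seen = on-stack-or-visited, exactly A's push condition), instead of A's rescan of the whole edge dict for every visited signal with O(n) list membership tests.
-- outside the precondition, e.g. on get_signal_delay_by_start_signal_list(['a'], {('z', 'q'): 1, ('q',): 2}): A returns {}, B returns {}; on get_signal_delay_by_start_signal_list(['a'], {('a',): 1}): A raises IndexError, B raises IndexError
import Mathlib
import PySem

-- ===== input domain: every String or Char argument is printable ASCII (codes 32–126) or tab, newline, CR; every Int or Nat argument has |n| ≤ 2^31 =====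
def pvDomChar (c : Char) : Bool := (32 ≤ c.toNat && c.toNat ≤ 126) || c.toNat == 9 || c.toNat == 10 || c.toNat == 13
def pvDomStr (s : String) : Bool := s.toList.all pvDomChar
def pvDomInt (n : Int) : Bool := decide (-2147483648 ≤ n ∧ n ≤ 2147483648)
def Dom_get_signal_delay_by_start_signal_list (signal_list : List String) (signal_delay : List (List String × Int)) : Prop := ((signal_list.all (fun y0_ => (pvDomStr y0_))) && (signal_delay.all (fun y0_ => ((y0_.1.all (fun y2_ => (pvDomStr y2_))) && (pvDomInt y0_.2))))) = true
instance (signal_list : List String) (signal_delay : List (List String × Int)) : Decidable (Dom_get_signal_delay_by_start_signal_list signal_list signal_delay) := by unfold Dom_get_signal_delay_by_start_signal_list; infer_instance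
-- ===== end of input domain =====

-- B replaces A's full rescan of signal_delay per visited signal (with O(n) list membership
-- tests) by a one-pass adjacency index and a DFS with an O(1) 'seen' set; equal return value.
-- Note: the Python A empties its signal_list argument in place (pop in a while loop), the
-- Python B does not — the equivalence proved here is about the RETURN value.

-- ===== PORT A =====
-- one step of A's inner 'for key,value in signal_delay.items()' loop;
-- state = (signal_list, part_signal_delay); avoid = avoid_loop (fixed during the for loop)
def pvInnerA (input : String) (avoid : List String)
    (st : List String × PySem.Dict (List String) Int) (kv : List String × Int) :
    List String × PySem.Dict (List String) Int :=
  if input = PySem.List.pyGetD kv.1 0 "" then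
    let part := st.2.insert kv.1 kv.2
    let output := PySem.List.pyGetD kv.1 1 ""
    if output ∉ st.1 ∧ output ∉ avoid then (st.1 ++ [output], part) else (st.1, part)
  else st

-- A's 'while len(signal_list)' loop; fuel is only a totality guard (see pvFuel below)
def pvLoopA (fuel : Nat) (signal_list avoid : List String)
    (part : PySem.Dict (List String) Int) (signal_delay : List (List String × Int)) :
    PySem.Dict (List String) Int :=
  match fuel with
  | 0 => part
  | fuel + 1 =>
    if signal_list.isEmpty then part
    else
      let input := signal_list.getLastD ""          -- signal_list.pop()
      let rest := signal_list.dropLast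
      let avoid' := avoid ++ [input]                -- avoid_loop.append(input)
      let stp := signal_delay.foldl (pvInnerA input avoid') (rest, part)
      pvLoopA fuel stp.1 avoid' stp.2 signal_delay

-- a fuel bound that dominates the number of loop iterations: each iteration either visits a
-- fresh signal (≤ n + e of those, each pushing ≤ e signals) or only pops one stack entry
def pvFuel (signal_list : List String) (signal_delay : List (List String × Int)) : Nat :=
  signal_list.length + (signal_delay.length + 1) * (signal_list.length + signal_delay.length) + 1

def get_signal_delay_by_start_signal_list (signal_list : List String) (signal_delay : List (List String × Int)) : List (List String × Int) :=
  (pvLoopA (pvFuel signal_list signal_delay) signal_list [] PySem.Dict.empty signal_delay).items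

-- ===== PORT B =====
-- adjacency.setdefault(key[0], []).append((key, value))
def pvAdj (signal_delay : List (List String × Int)) :
    PySem.Dict String (List (List String × Int)) :=
  signal_delay.foldl
    (fun d kv => d.modify (PySem.List.pyGetD kv.1 0 "") [] (· ++ [kv])) PySem.Dict.empty

-- one step of B's 'for key, value in adjacency.get(u, ())' loop; state = (stack, seen, result)
def pvInnerB (st : List String × PySem.Set String × PySem.Dict (List String) Int)
    (kv : List String × Int) :
    List String × PySem.Set String × PySem.Dict (List String) Int :=
  let res := st.2.2.insert kv.1 kv.2
  let w := PySem.List.pyGetD kv.1 1 ""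
  if w ∉ st.2.1 then (st.1 ++ [w], PySem.Set.add st.2.1 w, res) else (st.1, st.2.1, res)

-- B's 'while stack' loop
def pvLoopB (fuel : Nat) (stack : List String) (seen : PySem.Set String)
    (res : PySem.Dict (List String) Int) (adj : PySem.Dict String (List (List String × Int))) :
    PySem.Dict (List String) Int :=
  match fuel with
  | 0 => res
  | fuel + 1 =>
    if stack.isEmpty then res
    else
      let u := stack.getLastD ""                    -- stack.pop()
      let rest := stack.dropLast
      let stp := (adj.getD u []).foldl pvInnerB (rest, seen, res)
      pvLoopB fuel stp.1 stp.2.1 stp.2.2 adj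

def get_signal_delay_by_start_signal_list_alt (signal_list : List String) (signal_delay : List (List String × Int)) : List (List String × Int) :=
  if signal_list.isEmpty then []                    -- 'if not signal_list: return {}'
  else
    (pvLoopB (pvFuel signal_list signal_delay) signal_list (PySem.Set.ofList signal_list)
      PySem.Dict.empty (pvAdj signal_delay)).items

-- ===== PRECONDITION & SPEC =====
-- Pre_ excludes, for a non-empty signal_list, inputs containing an edge key shorter than 2
-- elements: whenever such a key's source signal is reached both Pythons raise IndexError on
-- key[0]/key[1] (empty keys raise on the very first pop); since exact reachability is not a
-- closed-form condition, a length-1 key is admitted only when its source is provably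
-- unreachable (not a start signal and not the target of any full-length key) — on the short
-- keys this over-approximation also excludes, both programs return the same value.
def Pre_get_signal_delay_by_start_signal_list (signal_list : List String) (signal_delay : List (List String × Int)) : Prop :=
  signal_list = [] ∨ ∀ p ∈ signal_delay, 2 ≤ p.1.length ∨
    (p.1 ≠ [] ∧ PySem.List.pyGetD p.1 0 "" ∉ signal_list ∧
      ∀ q ∈ signal_delay, 2 ≤ q.1.length → PySem.List.pyGetD q.1 1 "" ≠ PySem.List.pyGetD p.1 0 "")
instance (signal_list : List String) (signal_delay : List (List String × Int)) : Decidable (Pre_get_signal_delay_by_start_signal_list signal_list signal_delay) := by unfold Pre_get_signal_delay_by_start_signal_list; infer_instance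

def pvWitness_get_signal_delay_by_start_signal_list : List String × (List (List String × Int)) :=
  (["a"], [(["a", "b"], 3), (["b", "a"], 4)])

def Spec_get_signal_delay_by_start_signal_list (signal_list : List String) (signal_delay : List (List String × Int)) (out : List (List String × Int)) : Prop := out = get_signal_delay_by_start_signal_list_alt signal_list signal_delay
instance (signal_list : List String) (signal_delay : List (List String × Int)) (out : List (List String × Int)) : Decidable (Spec_get_signal_delay_by_start_signal_list signal_list signal_delay out) := by unfold Spec_get_signal_delay_by_start_signal_list; infer_instance

-- ===== CLAIM (what is proved, stated in full; the proofs are below) =====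
def Claim_equal_get_signal_delay_by_start_signal_list : Prop := ∀ (signal_list : List String) (signal_delay : List (List String × Int)), Dom_get_signal_delay_by_start_signal_list signal_list signal_delay → Pre_get_signal_delay_by_start_signal_list signal_list signal_delay → Spec_get_signal_delay_by_start_signal_list signal_list signal_delay (get_signal_delay_by_start_signal_list signal_list signal_delay)

-- ===== LEMMAS AND PROOFS =====

-- the adjacency bucket for u is exactly the subsequence of signal_delay whose key[0] is u
theorem pvAdjFold_getD (l : List (List String × Int))
    (d : PySem.Dict String (List (List String × Int))) (u : String) :
    (l.foldl (fun d kv => d.modify (PySem.List.pyGetD kv.1 0 "") [] (· ++ [kv])) d).getD u [] =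
      d.getD u [] ++ l.filter (fun kv => PySem.List.pyGetD kv.1 0 "" == u) := by
  induction l generalizing d with
  | nil => simp
  | cons kv t ih =>
    simp only [List.foldl_cons, List.filter_cons, ih]
    rw [PySem.Dict.getD_modify]
    by_cases h : u = PySem.List.pyGetD kv.1 0 ""
    · simp [h]
    · simp [h, Ne.symm h, beq_iff_eq]

theorem pvAdj_getD (signal_delay : List (List String × Int)) (u : String) :
    (pvAdj signal_delay).getD u [] =
      signal_delay.filter (fun kv => PySem.List.pyGetD kv.1 0 "" == u) := by
  unfold pvAdj
  rw [pvAdjFold_getD]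
  simp

-- a guarded fold over the whole list is the unguarded fold over the filtered list
theorem foldl_filter_of_id {σ α : Type} (p : α → Bool) (g f : σ → α → σ)
    (hid : ∀ s a, p a = false → g s a = s) (hon : ∀ s a, p a = true → g s a = f s a)
    (l : List α) (s : σ) : l.foldl g s = (l.filter p).foldl f s := by
  induction l generalizing s with
  | nil => rfl
  | cons a t ih =>
    by_cases h : p a = true
    · simp only [List.foldl_cons, List.filter_cons, h, if_pos, hon s a h, ih]
    · simp only [List.foldl_cons, List.filter_cons, Bool.not_eq_true] at *
      rw [hid s a (by simpa using h), ih]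
      simp [h]

-- simulation invariant between A's and B's loop states
def pvRel (avoid : List String) (sa : List String × PySem.Dict (List String) Int)
    (sb : List String × PySem.Set String × PySem.Dict (List String) Int) : Prop :=
  sa.1 = sb.1 ∧ sa.2 = sb.2.2 ∧ ∀ x, x ∈ sb.2.1 ↔ (x ∈ sb.1 ∨ x ∈ avoid)

theorem pvInner_sim (input : String) (avoid : List String) (kv : List String × Int)
    (hkv : PySem.List.pyGetD kv.1 0 "" = input) (sa sb_) (h : pvRel avoid sa sb_) :
    pvRel avoid (pvInnerA input avoid sa kv) (pvInnerB sb_ kv) := by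
  obtain ⟨h1, h2, h3⟩ := h
  have hcond : (PySem.List.pyGetD kv.1 1 "" ∉ sa.1 ∧ PySem.List.pyGetD kv.1 1 "" ∉ avoid) ↔
      PySem.List.pyGetD kv.1 1 "" ∉ sb_.2.1 := by
    rw [h3, h1]; tauto
  simp only [pvInnerA, pvInnerB, hkv, if_true]
  by_cases hw : PySem.List.pyGetD kv.1 1 "" ∉ sb_.2.1
  · rw [if_pos (hcond.mpr hw), if_pos hw]
    refine ⟨by simp [h1], by simp [h2], ?_⟩
    intro x
    rw [PySem.Set.mem_add]
    simp only [List.mem_append, List.mem_singleton, h3 x]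
    tauto
  · rw [if_neg (fun hc => hw (hcond.mp hc)), if_neg hw]
    exact ⟨by simp [h1], by simp [h2], h3⟩

theorem pvFold_sim (input : String) (avoid : List String) (l : List (List String × Int))
    (hl : ∀ kv ∈ l, PySem.List.pyGetD kv.1 0 "" = input) (sa sb_) (h : pvRel avoid sa sb_) :
    pvRel avoid (l.foldl (pvInnerA input avoid) sa) (l.foldl pvInnerB sb_) := by
  induction l generalizing sa sb_ with
  | nil => exact h
  | cons kv t ih =>
    simp only [List.foldl_cons]
    exact ih (fun a ha => hl a (List.mem_cons_of_mem _ ha)) _ _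
      (pvInner_sim input avoid kv (hl kv (List.mem_cons_self)) sa sb_ h)

theorem pvLoop_sim (fuel : Nat) (signal_delay : List (List String × Int)) :
    ∀ (stack avoid : List String) (part : PySem.Dict (List String) Int)
      (seen : PySem.Set String) (res : PySem.Dict (List String) Int),
      part = res → (∀ x, x ∈ seen ↔ (x ∈ stack ∨ x ∈ avoid)) →
      pvLoopA fuel stack avoid part signal_delay =
        pvLoopB fuel stack seen res (pvAdj signal_delay) := by
  induction fuel with
  | zero => intro _ _ part seen res hpr _; exact hpr
  | succ fuel ih =>
    intro stack avoid part seen res hpr hseen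
    rw [pvLoopA, pvLoopB]
    by_cases hst : stack.isEmpty
    · rw [if_pos hst, if_pos hst]; exact hpr
    · rw [if_neg hst, if_neg hst]
      have hne : stack ≠ [] := by simpa [List.isEmpty_iff] using hst
      have hsplit : stack.dropLast ++ [stack.getLastD ""] = stack := by
        clear hseen hst
        induction stack with
        | nil => exact absurd rfl hne
        | cons a t ih =>
          cases t with
          | nil => rfl
          | cons b u => simpa using ih (by simp)
      set input := stack.getLastD "" with hinput
      set avoid' := avoid ++ [input] with havoid'
      have hfoldA : signal_delay.foldl (pvInnerA input avoid') (stack.dropLast, part) =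
          (signal_delay.filter (fun kv => PySem.List.pyGetD kv.1 0 "" == input)).foldl
            (pvInnerA input avoid') (stack.dropLast, part) := by
        apply foldl_filter_of_id
        · intro s a hpa
          simp only [beq_eq_false_iff_ne, ne_eq] at hpa
          simp only [pvInnerA, if_neg (fun h : input = PySem.List.pyGetD a.1 0 "" => hpa h.symm)]
        · intro _ _ _; rfl
      have hrel : pvRel avoid'
          ((signal_delay.filter (fun kv => PySem.List.pyGetD kv.1 0 "" == input)).foldl
            (pvInnerA input avoid') (stack.dropLast, part))
          ((signal_delay.filter (fun kv => PySem.List.pyGetD kv.1 0 "" == input)).foldl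
            pvInnerB (stack.dropLast, seen, res)) := by
        apply pvFold_sim
        · intro kv hkv
          have := List.of_mem_filter hkv
          simpa [beq_iff_eq] using this
        · refine ⟨rfl, hpr, ?_⟩
          intro x
          rw [hseen x]
          constructor
          · rintro (hx | hx)
            · rw [← hsplit] at hx
              rcases List.mem_append.mp hx with hx | hx
              · exact Or.inl hx
              · exact Or.inr (List.mem_append.mpr (Or.inr hx))
            · exact Or.inr (List.mem_append.mpr (Or.inl hx))
          · rintro (hx | hx)
            · exact Or.inl (by rw [← hsplit]; exact List.mem_append.mpr (Or.inl hx))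
            · rcases List.mem_append.mp hx with hx | hx
              · exact Or.inr hx
              · exact Or.inl (by rw [← hsplit]; exact List.mem_append.mpr (Or.inr hx))
      obtain ⟨r1, r2, r3⟩ := hrel
      dsimp only
      rw [pvAdj_getD, hfoldA]
      set FA := (signal_delay.filter (fun kv => PySem.List.pyGetD kv.1 0 "" == input)).foldl
        (pvInnerA input avoid') (stack.dropLast, part) with hFA
      set FB := (signal_delay.filter (fun kv => PySem.List.pyGetD kv.1 0 "" == input)).foldl
        pvInnerB (stack.dropLast, seen, res) with hFB
      rw [ih FA.1 avoid' FA.2 FB.2.1 FB.2.2 r2 (fun x => by rw [r1]; exact r3 x), r1]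

-- A's loop on an empty stack returns its accumulator unchanged, for any fuel
theorem pvLoopA_nil (fuel : Nat) (avoid : List String) (part : PySem.Dict (List String) Int)
    (signal_delay : List (List String × Int)) :
    pvLoopA fuel [] avoid part signal_delay = part := by
  cases fuel with
  | zero => rfl
  | succ fuel => rw [pvLoopA]; rfl

-- ===== VERDICT (by name: the statement is the Claim_ definition above) =====
theorem get_signal_delay_by_start_signal_list_spec : Claim_equal_get_signal_delay_by_start_signal_list := by
  intro sl sd _ _
  unfold Spec_get_signal_delay_by_start_signal_list
  unfold get_signal_delay_by_start_signal_list get_signal_delay_by_start_signal_list_alt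
  by_cases h : sl.isEmpty
  · rw [if_pos h]
    have hnil : sl = [] := by simpa [List.isEmpty_iff] using h
    subst hnil
    rw [pvLoopA_nil]
    rfl
  · rw [if_neg h]
    rw [pvLoop_sim (pvFuel sl sd) sd sl [] PySem.Dict.empty (PySem.Set.ofList sl) PySem.Dict.empty rfl]
    intro x
    simp [PySem.Set.mem_ofList]
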